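-- pv_equiv track=rewrite | github.com/TariqBlecher/tblenser | tblens/tblens/utils.py | find_turning_points
-- ===== SOURCE A (Python) =====
-- def find_turning_points(array):
--     """
--     Brute force algorithm to find the turning points within an 1D array and returns the indices of the minimum and
--     maximum turning points in two separate lists. Only suitable for smooth, noise-less functions.
--     """
--     idx_maxima, idx_minima = [], []
--
--     NEUTRAL, RISING, FALLING = range(3)
--
--     def get_state(initial_position, final_position):
--         if initial_position < final_position:
--             return RISING
--         if initial_position > final_position:
--             return FALLING
--         return NEUTRAL
--
--     pre_state = get_state(array[0], array[1])
--     start_index = 1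
--     for array_index in range(2, len(array)):
--         state = get_state(array[array_index - 1], array[array_index])
--         if state != NEUTRAL:
--             if pre_state != NEUTRAL and pre_state != state:
--                 if state == FALLING:
--                     idx_maxima.append((start_index + array_index - 1) // 2)
--                 else:
--                     idx_minima.append((start_index + array_index - 1) // 2)
--             start_index = array_index
--             pre_state = state
--     return idx_minima, idx_maxima
-- ===== SOURCE B (Python) =====
-- def find_turning_points(array):
--     # Build the list of non-neutral transitions (index, sign), then scan adjacent pairs.
--     trans = []
--     for i in range(1, len(array)):
--         if array[i - 1] < array[i]:
--             trans.append((i, 1))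
--         elif array[i - 1] > array[i]:
--             trans.append((i, -1))
--     idx_minima, idx_maxima = [], []
--     for (p, s1), (c, s2) in zip(trans, trans[1:]):
--         if s1 != s2:
--             mid = (p + c - 1) // 2
--             if s2 == -1:
--                 idx_maxima.append(mid)
--             else:
--                 idx_minima.append(mid)
--     return idx_minima, idx_maxima
-- ===== Notes on version B (the rewrite author's own statement) =====
-- stated objective: alternative
-- what changed: Replaces A's incremental pre_state/start_index state machine with two passes: first build the explicit list of non-neutral transitions (index, sign), then scan adjacent transition pairs to classify and place turning points.
-- outside the precondition, e.g. on find_turning_points([1]): A raises IndexError, B returns ([], [])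
import Mathlib
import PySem

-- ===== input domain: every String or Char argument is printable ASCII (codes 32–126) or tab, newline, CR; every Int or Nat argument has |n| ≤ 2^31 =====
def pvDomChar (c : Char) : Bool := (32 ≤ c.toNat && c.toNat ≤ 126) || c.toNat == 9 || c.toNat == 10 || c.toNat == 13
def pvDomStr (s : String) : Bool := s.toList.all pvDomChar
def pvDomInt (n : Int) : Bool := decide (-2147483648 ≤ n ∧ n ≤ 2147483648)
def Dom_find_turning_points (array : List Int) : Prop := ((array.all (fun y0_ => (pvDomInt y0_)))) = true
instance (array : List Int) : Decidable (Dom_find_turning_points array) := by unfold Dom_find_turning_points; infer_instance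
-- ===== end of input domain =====

-- B replaces A's pre_state/start_index state machine by an explicit transition list plus a pairwise scan
-- (same O(n) cost; alternative decomposition). A raises IndexError for length < 2; Pre_ excludes exactly those inputs.

-- ===== PORT A =====
-- get_state: RISING = 1, FALLING = 2, NEUTRAL = 0
def pvState (a b : Int) : Int := if a < b then 1 else if b < a then 2 else 0

-- loop body of A; state = (idx_minima, idx_maxima, pre_state, start_index)
def pvAStep (array : List Int) (s : List Int × List Int × Int × Int) (i : Int) :
    List Int × List Int × Int × Int :=
  let state := pvState ((PySem.List.pyGet? array (i - 1)).getD 0) ((PySem.List.pyGet? array i).getD 0)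
  if state ≠ 0 then
    if s.2.2.1 ≠ 0 ∧ s.2.2.1 ≠ state then
      if state = 2 then (s.1, s.2.1 ++ [PySem.Int.floordiv (s.2.2.2 + i - 1) 2], state, i)
      else (s.1 ++ [PySem.Int.floordiv (s.2.2.2 + i - 1) 2], s.2.1, state, i)
    else (s.1, s.2.1, state, i)
  else s

def find_turning_points (array : List Int) : List Int × List Int :=
  let pre0 := pvState ((PySem.List.pyGet? array 0).getD 0) ((PySem.List.pyGet? array 1).getD 0)
  let st := (PySem.List.pyRange 2 (array.length : Int) 1).foldl (pvAStep array) ([], [], pre0, 1)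
  (st.1, st.2.1)

-- ===== PORT B =====
-- first pass: collect (i, sign) for each strict rise (+1) / fall (-1)
def pvTransStep (array : List Int) (acc : List (Int × Int)) (i : Int) : List (Int × Int) :=
  let a := (PySem.List.pyGet? array (i - 1)).getD 0
  let b := (PySem.List.pyGet? array i).getD 0
  if a < b then acc ++ [(i, 1)] else if b < a then acc ++ [(i, -1)] else acc

-- second pass body over an adjacent pair of transitions; mm = (idx_minima, idx_maxima)
def pvPairStep (mm : List Int × List Int) (pc : (Int × Int) × (Int × Int)) : List Int × List Int :=
  if pc.1.2 ≠ pc.2.2 then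
    if pc.2.2 = -1 then (mm.1, mm.2 ++ [PySem.Int.floordiv (pc.1.1 + pc.2.1 - 1) 2])
    else (mm.1 ++ [PySem.Int.floordiv (pc.1.1 + pc.2.1 - 1) 2], mm.2)
  else mm

def find_turning_points_alt (array : List Int) : List Int × List Int :=
  let trans := (PySem.List.pyRange 1 (array.length : Int) 1).foldl (pvTransStep array) []
  (trans.zip trans.tail).foldl pvPairStep ([], [])

-- ===== PRECONDITION & SPEC =====
-- Pre_ excludes exactly the inputs (length < 2) on which A raises IndexError at array[1].
def Pre_find_turning_points (array : List Int) : Prop := 2 ≤ array.length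
instance (array : List Int) : Decidable (Pre_find_turning_points array) := by
  unfold Pre_find_turning_points; infer_instance
def pvWitness_find_turning_points : List Int := [0, 2, 1, 3]

def Spec_find_turning_points (array : List Int) (out : List Int × List Int) : Prop :=
  out = find_turning_points_alt array
instance (array : List Int) (out : List Int × List Int) : Decidable (Spec_find_turning_points array out) := by
  unfold Spec_find_turning_points; infer_instance

-- ===== CLAIM (what is proved, stated in full; the proofs are below) =====
def Claim_equal_find_turning_points : Prop := ∀ (array : List Int),
  Dom_find_turning_points array → Pre_find_turning_points array →
  Spec_find_turning_points array (find_turning_points array)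

-- ===== LEMMAS AND PROOFS =====

-- zipping a snoc with its tail appends one pair (last, new)
lemma pv_zip_tail_snoc {α : Type} (t : List α) (x : α) (hx : t.getLast? = some x) (y : α) :
    (t ++ [y]).zip (t ++ [y]).tail = t.zip t.tail ++ [(x, y)] := by
  induction t with
  | nil => simp at hx
  | cons a r ih =>
    cases r with
    | nil => simp_all
    | cons b r' =>
      have := ih (by simpa using hx)
      simp only [List.cons_append, List.tail_cons, List.zip_cons_cons] at this ⊢
      rw [this]

-- the loop invariant: after processing indices < m, A's fold state is determined by B's transition list
def pvInv (array : List Int) (m : Int) : Prop :=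
  let t := (PySem.List.pyRange 1 m 1).foldl (pvTransStep array) []
  let A := (PySem.List.pyRange 2 m 1).foldl (pvAStep array)
    ([], [], pvState ((PySem.List.pyGet? array 0).getD 0) ((PySem.List.pyGet? array 1).getD 0), 1)
  let P := (t.zip t.tail).foldl pvPairStep ([], [])
  (t = [] → A = ([], [], 0, 1)) ∧
  (∀ j s, t.getLast? = some (j, s) →
    (s = 1 ∨ s = -1) ∧ A = (P.1, P.2, if s = 1 then 1 else 2, j))

lemma pv_inv (array : List Int) (k : Nat) : pvInv array (2 + (k : Int)) := by
  induction k with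
  | zero =>
    unfold pvInv
    have h1 : PySem.List.pyRange 1 2 1 = [1] := by decide
    have h2 : PySem.List.pyRange 2 2 1 = ([] : List Int) := by decide
    simp only [Int.natCast_zero, add_zero, h1, h2, List.foldl_cons, List.foldl_nil]
    unfold pvTransStep pvState
    by_cases hlt : (PySem.List.pyGet? array 0).getD 0 < (PySem.List.pyGet? array 1).getD 0
    · simp [hlt]
    · by_cases hgt : (PySem.List.pyGet? array 1).getD 0 < (PySem.List.pyGet? array 0).getD 0
      · simp [hlt, hgt]
      · simp [hlt, hgt]
  | succ k ih =>
    unfold pvInv at ih ⊢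
    set m : Int := 2 + (k : Int) with hm
    have hm1 : 2 + ((k : Nat) + 1 : Nat) = m + 1 := by push_cast; ring
    rw [hm1]
    have hr1 : PySem.List.pyRange 1 (m + 1) 1 = PySem.List.pyRange 1 m 1 ++ [m] :=
      PySem.List.pyRange_one_succ_right (by omega)
    have hr2 : PySem.List.pyRange 2 (m + 1) 1 = PySem.List.pyRange 2 m 1 ++ [m] :=
      PySem.List.pyRange_one_succ_right (by omega)
    rw [hr1, hr2, List.foldl_append, List.foldl_append]
    set t := (PySem.List.pyRange 1 m 1).foldl (pvTransStep array) [] with ht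
    set A := (PySem.List.pyRange 2 m 1).foldl (pvAStep array)
      ([], [], pvState ((PySem.List.pyGet? array 0).getD 0) ((PySem.List.pyGet? array 1).getD 0), 1) with hA
    simp only [List.foldl_cons, List.foldl_nil]
    obtain ⟨ihnil, ihlast⟩ := ih
    set a := (PySem.List.pyGet? array (m - 1)).getD 0 with ha
    set b := (PySem.List.pyGet? array m).getD 0 with hb
    by_cases hlt : a < b
    · -- rising step: transition (m, 1)
      have hstate : pvState a b = 1 := by simp [pvState, hlt]
      have htrans : pvTransStep array t m = t ++ [(m, 1)] := by
        simp [pvTransStep, ← ha, ← hb, hlt]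
      rw [htrans]
      rcases h : t.getLast? with _ | ⟨j, s⟩
      · -- t empty
        have htn : t = [] := List.getLast?_eq_none_iff.mp h
        have hAv := ihnil htn
        constructor
        · intro hc; simp [htn] at hc
        · intro j' s' hl
          rw [htn] at hl ⊢
          simp only [List.nil_append, List.getLast?_singleton, Option.some.injEq, Prod.mk.injEq] at hl
          obtain ⟨hj', hs'⟩ := hl
          subst hj'; subst hs'
          refine ⟨Or.inl rfl, ?_⟩
          simp [pvAStep, ← ha, ← hb, hstate, hAv]
      · obtain ⟨hs01, hAv⟩ := ihlast j s h
        have htn : t ≠ [] := by intro hc; rw [hc] at h; simp at h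
        have hzip := pv_zip_tail_snoc t (j, s) h ((m, 1) : Int × Int)
        constructor
        · intro hc; simp at hc
        · intro j' s' hl
          simp at hl
          obtain ⟨hj', hs'⟩ := hl
          subst hj'; subst hs'
          refine ⟨Or.inl rfl, ?_⟩
          rw [hzip, List.foldl_append]
          simp only [List.foldl_cons, List.foldl_nil]
          by_cases hs1 : s = 1
          · -- same direction: no turning point
            subst hs1
            simp only [hAv, pvAStep, ← ha, ← hb, hstate, pvPairStep]
            norm_num
          · -- previous fall, now rise: minimum
            have hsm : s = -1 := by rcases hs01 with h1 | h1; exact absurd h1 hs1; exact h1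
            subst hsm
            simp only [hAv, pvAStep, ← ha, ← hb, hstate, pvPairStep]
            norm_num
    · by_cases hgt : b < a
      · -- falling step: transition (m, -1)
        have hstate : pvState a b = 2 := by simp [pvState, hlt, hgt]
        have htrans : pvTransStep array t m = t ++ [(m, -1)] := by
          simp [pvTransStep, ← ha, ← hb, hlt, hgt]
        rw [htrans]
        rcases h : t.getLast? with _ | ⟨j, s⟩
        · have htn : t = [] := List.getLast?_eq_none_iff.mp h
          have hAv := ihnil htn
          constructor
          · intro hc; simp [htn] at hc
          · intro j' s' hl
            rw [htn] at hl ⊢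
            simp only [List.nil_append, List.getLast?_singleton, Option.some.injEq, Prod.mk.injEq] at hl
            obtain ⟨hj', hs'⟩ := hl
            subst hj'; subst hs'
            refine ⟨Or.inr rfl, ?_⟩
            simp [pvAStep, ← ha, ← hb, hstate, hAv]
        · obtain ⟨hs01, hAv⟩ := ihlast j s h
          have hzip := pv_zip_tail_snoc t (j, s) h ((m, -1) : Int × Int)
          constructor
          · intro hc; simp at hc
          · intro j' s' hl
            simp at hl
            obtain ⟨hj', hs'⟩ := hl
            subst hj'; subst hs'
            refine ⟨Or.inr rfl, ?_⟩
            rw [hzip, List.foldl_append]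
            simp only [List.foldl_cons, List.foldl_nil]
            by_cases hs1 : s = 1
            · -- previous rise, now fall: maximum
              subst hs1
              simp only [hAv, pvAStep, ← ha, ← hb, hstate, pvPairStep]
              norm_num
            · have hsm : s = -1 := by rcases hs01 with h1 | h1; exact absurd h1 hs1; exact h1
              subst hsm
              simp only [hAv, pvAStep, ← ha, ← hb, hstate, pvPairStep]
              norm_num
      · -- neutral step: nothing changes on either side
        have hstate : pvState a b = 0 := by simp [pvState, hlt, hgt]
        have htrans : pvTransStep array t m = t := by
          simp [pvTransStep, ← ha, ← hb, hlt, hgt]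
        have hstep : ∀ s0, pvAStep array s0 m = s0 := by
          intro s0; simp [pvAStep, ← ha, ← hb, hstate]
        rw [htrans, hstep]
        exact ⟨ihnil, ihlast⟩

-- ===== VERDICT (by name: the statement is the Claim_ definition above) =====
theorem find_turning_points_spec : Claim_equal_find_turning_points := by
  intro array _ hpre
  unfold Spec_find_turning_points find_turning_points find_turning_points_alt
  dsimp only
  have hk : (array.length : Int) = 2 + ((array.length - 2 : Nat) : Int) := by
    have : 2 ≤ array.length := hpre
    omega
  have hinv := pv_inv array (array.length - 2)
  unfold pvInv at hinv
  rw [← hk] at hinv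
  obtain ⟨hnil, hlast⟩ := hinv
  set t := (PySem.List.pyRange 1 (array.length : Int) 1).foldl (pvTransStep array) [] with ht
  rcases h : t.getLast? with _ | ⟨j, s⟩
  · have htn : t = [] := List.getLast?_eq_none_iff.mp h
    rw [hnil htn, htn]
    simp
  · obtain ⟨_, hAv⟩ := hlast j s h
    rw [hAv]
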